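-- pv_equiv track=rewrite | github.com/RabahCodeVirtuose/projet_graphes_rabah_mohamed | codes/construire_GM.py | dfs_augmentant
-- ===== SOURCE A (Python) =====
-- def dfs_augmentant(u, niveau, HT, chemin, chemins, N,bloques):
--     """
--     Parcours en profondeur (DFS) pour trouver un chemin augmentant à partir du sommet u
--     dans le graphe transposé H_T, remontant du niveau k vers le niveau 0.
--
--     Args:
--         u : Le sommet courant à visiter.
--         niveau (dict): Le dictionnaire des niveaux {sommet: niveau}.
--         HT (dict): Le graphe transposé H_T (niveau i+1 -> niveau i).
--         chemin (list): La liste des sommets visités jusqu'à u (chemin partiel).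
--         chemins (list): La liste où les sets d'arêtes des chemins augmentants complets sont stockés.
--         N (set): L'ensemble des sommets de la partition N (pour l'orientation N->B).
--         bloques (set): L'ensemble des sommets déjà utilisés dans un chemin augmentant trouvé
--                        dans cette phase BFS (pour garantir le caractère disjoint des chemins).
--
--     Returns:
--         bool: True si un chemin augmentant a été trouvé depuis u, False sinon.
--     """
--
--
--     if niveau[u] == 0:
--         arcs = set()
--         full_path = list(reversed(chemin + [u]))
--
--         # Le sommet de niveau 0 (dans N) est maintenant inclus dans le path
--
--         for i in range(len(full_path)-1):
--             a, b = full_path[i], full_path[i+1]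
--
--             # ORIENTATION : Toujours N -> B
--             if a in N:
--                 arcs.add((a, b))
--             else:
--                 arcs.add((b, a))
--
--         chemins.append(arcs)
--
--         # Blocage de tous les sommets du chemin
--         for node in full_path:
--             bloques.add(node)
--
--         return True # Chemin trouvé
--
--     # DFS récursif
--     for v in HT[u]:
--         # On vérifie si v est bloqué avant de descendre
--         if niveau[v] == niveau[u] - 1 and v not in bloques:
--
--             # Si l'appel récursif trouve un chemin...
--             if dfs_augmentant(v, niveau, HT, chemin + [u], chemins, N, bloques):
--                 # ...le chemin entier est bloqué. On arrête de chercher d'autres chemins partant de u.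
--                 # Ceci garantit qu'un sommet (u) ne participe qu'à un seul chemin dans cette phase.
--                 # Marquer u comme bloqué est déjà fait par le blocage du full_path.
--                 return True
--
--     return False # Pas de chemin trouvé partant d'ici
-- ===== SOURCE B (Python) =====
-- def dfs_augmentant(u, niveau, HT, chemin, chemins, N, bloques):
--     # Iterative (explicit-stack) DFS; entries carry (vertex, partial path).
--     # Neighbors are pushed in reverse so the first completed path is the
--     # same leftmost path the recursive version finds.
--     stack = [(u, chemin)]
--     while stack:
--         x, path = stack.pop()
--         if niveau[x] == 0:
--             full_path = list(reversed(path + [x]))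
--             arcs = set()
--             for a, b in zip(full_path, full_path[1:]):
--                 arcs.add((a, b) if a in N else (b, a))
--             chemins.append(arcs)
--             bloques.update(full_path)
--             return True
--         for v in reversed(HT[x]):
--             if niveau[v] == niveau[x] - 1 and v not in bloques:
--                 stack.append((v, path + [x]))
--     return False
-- ===== Notes on version B (the rewrite author's own statement) =====
-- stated objective: alternative
-- what changed: Replaces the recursive DFS by an explicit stack-based DFS: entries carry (vertex, partial path), neighbors are pushed in reverse so the first completed path is the recursion's leftmost one, and the arc set is built once at the point of success with zip.
import Mathlib
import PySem

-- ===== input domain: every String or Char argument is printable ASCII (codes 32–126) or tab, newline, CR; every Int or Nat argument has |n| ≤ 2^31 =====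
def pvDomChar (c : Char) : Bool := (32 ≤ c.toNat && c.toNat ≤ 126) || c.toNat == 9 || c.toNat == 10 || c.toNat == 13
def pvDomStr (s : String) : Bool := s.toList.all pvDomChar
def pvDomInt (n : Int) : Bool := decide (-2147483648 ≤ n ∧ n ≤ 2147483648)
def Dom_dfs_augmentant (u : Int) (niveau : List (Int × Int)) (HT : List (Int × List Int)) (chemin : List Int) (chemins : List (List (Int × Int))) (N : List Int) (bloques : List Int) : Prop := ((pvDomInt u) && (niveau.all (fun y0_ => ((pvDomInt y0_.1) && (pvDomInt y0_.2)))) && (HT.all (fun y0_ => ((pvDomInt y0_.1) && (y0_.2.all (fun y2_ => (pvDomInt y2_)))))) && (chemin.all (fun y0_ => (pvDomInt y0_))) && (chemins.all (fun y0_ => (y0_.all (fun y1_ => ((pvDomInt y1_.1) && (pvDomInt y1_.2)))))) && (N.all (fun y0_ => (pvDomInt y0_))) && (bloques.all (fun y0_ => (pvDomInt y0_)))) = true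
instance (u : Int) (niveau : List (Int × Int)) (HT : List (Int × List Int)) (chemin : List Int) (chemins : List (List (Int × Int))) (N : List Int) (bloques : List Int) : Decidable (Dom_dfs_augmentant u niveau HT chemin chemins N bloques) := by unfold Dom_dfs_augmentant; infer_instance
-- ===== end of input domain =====

-- B replaces the recursive DFS by an explicit stack-based DFS (same leftmost path; neighbors
-- pushed in reverse): a different decomposition of the same search, not claimed faster.
-- A (and B) mutate `chemins` and `bloques` in place on success; the equivalence proved here is
-- about the RETURN value only (the Python B performs the same mutations).

-- ===== PORT A =====
-- Recursive DFS, literal transliteration of Source A; the Nat fuel is a termination artifact: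
-- levels strictly decrease along the recursion, so depth ≤ niveau.length and the initial
-- fuel niveau.length + 1 is never exhausted on inputs where the Python returns.
-- Dict lookups niveau[x] / HT[x] are PySem.Dict.get?; `none` = Python's KeyError (excluded by Pre_).
-- the `for v in HT[u]` loop with its early `return True`; `rec` is the recursive call
-- (abstracted so that dfsA is structural recursion on the fuel and kernel-computable)
def dfsALoopGen (rec : Int → List Int → Bool) (niveau : List (Int × Int)) (bloques : List Int)
    (lu u : Int) (chem : List Int) : List Int → Bool
  | [] => false
  | v :: vs =>
    match (PySem.Dict.mk niveau).get? v with
    | none => false      -- KeyError niveau[v]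
    | some lv =>
      if lv == lu - 1 && !(bloques.contains v) then
        if rec v (chem ++ [u]) then true
        else dfsALoopGen rec niveau bloques lu u chem vs
      else dfsALoopGen rec niveau bloques lu u chem vs

def dfsA (niveau : List (Int × Int)) (HT : List (Int × List Int)) (bloques : List Int) :
    Nat → Int → List Int → Bool
  | 0, _, _ => false
  | f + 1, u, chem =>
    match (PySem.Dict.mk niveau).get? u with
    | none => false      -- KeyError niveau[u]
    | some lu =>
      if lu == 0 then true        -- path found (arcs/chemins/bloques are side effects, not the return value)
      else
        match (PySem.Dict.mk HT).get? u with
        | none => false  -- KeyError HT[u]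
        | some vs => dfsALoopGen (fun v c => dfsA niveau HT bloques f v c) niveau bloques lu u chem vs

def dfs_augmentant (u : Int) (niveau : List (Int × Int)) (HT : List (Int × List Int)) (chemin : List Int) (chemins : List (List (Int × Int))) (N : List Int) (bloques : List Int) : Bool :=
  dfsA niveau HT bloques (niveau.length + 1) u chemin

-- ===== PORT B =====
-- Explicit-stack DFS, transliteration of Source B.  A stack entry is (budget, vertex, path):
-- the Nat budget per entry and the pop-count fuel are termination artifacts (levels strictly
-- decrease, so with the initial budget niveau.length + 1 and fuel C^(niveau.length+1) + 1,
-- C = 1 + total adjacency size, neither is exhausted on inputs where the Python returns).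
-- Head of the list = top of the stack; Source B pushes neighbors in reversed order, so after the
-- push the top-to-bottom order is HT[x]'s order: children are prepended in that order here.

def dfsB (niveau : List (Int × Int)) (HT : List (Int × List Int)) (bloques : List Int) :
    Nat → List (Nat × Int × List Int) → Bool
  | 0, _ => false                                            -- pop-count fuel exhausted (termination artifact, unreachable from the initial fuel)
  | _ + 1, [] => false                                       -- stack empty: return False
  | g + 1, (0, _, _) :: rest => dfsB niveau HT bloques g rest  -- exhausted budget (termination artifact, unreachable from the initial budget inside Pre_)
  | g + 1, (d + 1, x, path) :: rest =>
    match (PySem.Dict.mk niveau).get? x with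
    | none => false      -- KeyError niveau[x]
    | some lx =>
      if lx == 0 then true    -- full_path/arcs/chemins/bloques are side effects, not the return value
      else
        match (PySem.Dict.mk HT).get? x with
        | none => false  -- KeyError HT[x]
        | some vs =>
          dfsB niveau HT bloques g
            (((vs.filter (fun v =>
                match (PySem.Dict.mk niveau).get? v with
                | some lv => lv == lx - 1 && !(bloques.contains v)
                | none => false)).map (fun v => (d, v, path ++ [x]))) ++ rest)
            -- `none => false` drops v where the Python raises KeyError; excluded by Pre_

def dfs_augmentant_alt (u : Int) (niveau : List (Int × Int)) (HT : List (Int × List Int)) (chemin : List Int) (chemins : List (List (Int × Int))) (N : List Int) (bloques : List Int) : Bool :=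
  dfsB niveau HT bloques
    ((1 + (HT.map (fun p => p.2.length)).sum) ^ (niveau.length + 1) + 1)
    [(niveau.length + 1, u, chemin)]

-- ===== PRECONDITION & SPEC =====
def pvHasKey {α : Type} (d : List (Int × α)) (k : Int) : Bool := d.any (fun p => p.1 == k)

-- Pre_ excludes inputs where a dict lookup can hit a missing key (Python KeyError).  It is a
-- closed-form over-approximation of the exact no-raise condition: u must be a niveau key (and,
-- unless its level is 0, an HT key), and every HT entry whose key COULD be expanded (key = u, or
-- unblocked with level below u's and nonzero) must list only niveau keys, each of which must be
-- an HT key when it could itself be descended into; so Pre_ also excludes some inputs on which A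
-- returns without ever reaching the missing key.
def pvPreB (u : Int) (niveau : List (Int × Int)) (HT : List (Int × List Int)) (bloques : List Int) : Bool :=
  match (PySem.Dict.mk niveau).get? u with
  | none => false
  | some lu =>
    (lu == 0 || pvHasKey HT u) &&
    HT.all (fun p =>
      match (PySem.Dict.mk niveau).get? p.1 with
      | none => true
      | some lk =>
        if lk == 0 then true
        else
          if p.1 == u || (!(bloques.contains p.1) && decide (lk < lu)) then
            p.2.all (fun v =>
              match (PySem.Dict.mk niveau).get? v with
              | none => false
              | some lv => !(lv == lk - 1) || bloques.contains v || lv == 0 || pvHasKey HT v)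
          else true)

def Pre_dfs_augmentant (u : Int) (niveau : List (Int × Int)) (HT : List (Int × List Int)) (chemin : List Int) (chemins : List (List (Int × Int))) (N : List Int) (bloques : List Int) : Prop :=
  pvPreB u niveau HT bloques = true
instance (u : Int) (niveau : List (Int × Int)) (HT : List (Int × List Int)) (chemin : List Int) (chemins : List (List (Int × Int))) (N : List Int) (bloques : List Int) : Decidable (Pre_dfs_augmentant u niveau HT chemin chemins N bloques) := by unfold Pre_dfs_augmentant; infer_instance

def pvWitness_dfs_augmentant : Int × (List (Int × Int)) × (List (Int × List Int)) × List Int × (List (List (Int × Int))) × List Int × List Int :=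
  (1, [(1, 1), (2, 0)], [(1, [2]), (2, [])], [], [], [1], [])

def Spec_dfs_augmentant (u : Int) (niveau : List (Int × Int)) (HT : List (Int × List Int)) (chemin : List Int) (chemins : List (List (Int × Int))) (N : List Int) (bloques : List Int) (out : Bool) : Prop := out = dfs_augmentant_alt u niveau HT chemin chemins N bloques
instance (u : Int) (niveau : List (Int × Int)) (HT : List (Int × List Int)) (chemin : List Int) (chemins : List (List (Int × Int))) (N : List Int) (bloques : List Int) (out : Bool) : Decidable (Spec_dfs_augmentant u niveau HT chemin chemins N bloques out) := by unfold Spec_dfs_augmentant; infer_instance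

-- ===== CLAIM (what is proved, stated in full; the proofs are below) =====
def Claim_equal_dfs_augmentant : Prop := ∀ (u : Int) (niveau : List (Int × Int)) (HT : List (Int × List Int)) (chemin : List Int) (chemins : List (List (Int × Int))) (N : List Int) (bloques : List Int), Dom_dfs_augmentant u niveau HT chemin chemins N bloques → Pre_dfs_augmentant u niveau HT chemin chemins N bloques → Spec_dfs_augmentant u niveau HT chemin chemins N bloques (dfs_augmentant u niveau HT chemin chemins N bloques)

-- ===== LEMMAS AND PROOFS =====

-- weight Σ C^budget of a stack (C > every adjacency-list length): bounds the number of pops left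
def pvStackW (C : Nat) : List (Nat × Int × List Int) → Nat
  | [] => 0
  | e :: rest => C ^ e.1 + pvStackW C rest

theorem pvStackW_append (C : Nat) (a b : List (Nat × Int × List Int)) :
    pvStackW C (a ++ b) = pvStackW C a + pvStackW C b := by
  induction a with
  | nil => simp [pvStackW]
  | cons e t ih => simp only [List.cons_append, pvStackW, ih]; omega

theorem pvStackW_map (C d : Nat) (f : Int → Nat × Int × List Int)
    (hf : ∀ v, (f v).1 = d) (l : List Int) :
    pvStackW C (l.map f) = l.length * C ^ d := by
  induction l with
  | nil => simp [pvStackW]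
  | cons v t ih =>
    simp only [List.map_cons, pvStackW, hf, ih, List.length_cons]; ring

theorem pvLen_le_sum : ∀ (HT : List (Int × List Int)) (x : Int) (vs : List Int),
    (PySem.Dict.mk HT).get? x = some vs → vs.length ≤ (HT.map (fun p => p.2.length)).sum := by
  intro HT; induction HT with
  | nil => intro x vs h; simp [PySem.Dict.get?] at h
  | cons e t ih =>
    intro x vs h
    cases e with | mk k w =>
    rw [PySem.Dict.get?_mk_cons] at h
    by_cases hk : (k == x) = true
    · simp [hk] at h; subst h; simp
    · simp [hk] at h; have := ih x vs h; simp; omega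


-- "run A on every stack entry, OR the results" : the specification both DFS shapes meet
def pvAny (niveau : List (Int × Int)) (HT : List (Int × List Int)) (bloques : List Int) :
    List (Nat × Int × List Int) → Bool
  | [] => false
  | (d, x, p) :: rest => dfsA niveau HT bloques d x p || pvAny niveau HT bloques rest

theorem pvAny_append (niveau : List (Int × Int)) (HT : List (Int × List Int)) (bloques : List Int)
    (a b : List (Nat × Int × List Int)) :
    pvAny niveau HT bloques (a ++ b) = (pvAny niveau HT bloques a || pvAny niveau HT bloques b) := by
  induction a with
  | nil => simp [pvAny]
  | cons e t ih => cases e with | mk d p => cases p with | mk x q =>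
      simp [pvAny, ih, Bool.or_assoc]

theorem pvHasKey_get? {α : Type} : ∀ (d : List (Int × α)) (k : Int),
    pvHasKey d k = true → ∃ v, (PySem.Dict.mk d).get? k = some v := by
  intro d; induction d with
  | nil => intro k h; simp [pvHasKey] at h
  | cons e t ih =>
    intro k h
    cases e with | mk a b =>
    rw [PySem.Dict.get?_mk_cons]
    by_cases hk : (a == k) = true
    · exact ⟨b, by simp [hk]⟩
    · simp [hk]
      apply ih
      simp [pvHasKey] at h ⊢
      rcases h with h | h
      · exact absurd (by simp [h]) hk
      · simpa [pvHasKey] using h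

theorem pvGet?_mem {α : Type} : ∀ (d : List (Int × α)) (k : Int) (v : α),
    (PySem.Dict.mk d).get? k = some v → (k, v) ∈ d := by
  intro d; induction d with
  | nil => intro k v h; simp [PySem.Dict.get?] at h
  | cons e t ih =>
    intro k v h
    cases e with | mk a b =>
    rw [PySem.Dict.get?_mk_cons] at h
    by_cases hk : (a == k) = true
    · simp [hk] at h; subst h
      have : a = k := by simpa using hk
      subst this; exact List.mem_cons_self
    · simp [hk] at h
      exact List.mem_cons_of_mem _ (ih k v h)

-- inner loop of A = processing the filtered-children block of B's stack
theorem pvAny_children (niveau : List (Int × Int)) (HT : List (Int × List Int)) (bloques : List Int)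
    (d : Nat) (lx x : Int) (p : List Int) :
    ∀ vs : List Int, (∀ v ∈ vs, pvHasKey niveau v = true) →
    pvAny niveau HT bloques
      ((vs.filter (fun v =>
          match (PySem.Dict.mk niveau).get? v with
          | some lv => lv == lx - 1 && !(bloques.contains v)
          | none => false)).map (fun v => (d, v, p ++ [x])))
      = dfsALoopGen (fun v c => dfsA niveau HT bloques d v c) niveau bloques lx x p vs := by
  intro vs
  induction vs with
  | nil => intro _; simp [pvAny, dfsALoopGen]
  | cons v t ih =>
    intro hkeys
    obtain ⟨lv, hv⟩ := pvHasKey_get? niveau v (hkeys v (by simp))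
    have ht := ih (fun w hw => hkeys w (by simp [hw]))
    simp only [List.filter_cons, hv]
    by_cases hc : (lv == lx - 1 && !(bloques.contains v)) = true
    · simp only [hc, if_true, List.map_cons, pvAny, dfsALoopGen, hv, ht]
      by_cases hres : dfsA niveau HT bloques d v (p ++ [x]) = true <;>
        simp [Bool.not_eq_true] at hres <;> simp [hres]
    · simp only [if_neg hc]
      rw [ht]
      simp only [dfsALoopGen, hv]
      rw [if_neg hc]

-- invariant carried by every stack entry / recursive call: the vertex has a level, has an HT
-- entry if it can be expanded, and is either the start vertex or unblocked with level < lu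
def pvQ (niveau : List (Int × Int)) (HT : List (Int × List Int)) (bloques : List Int)
    (u lu x : Int) : Prop :=
  ∃ lx, (PySem.Dict.mk niveau).get? x = some lx ∧
    (¬ lx = 0 → pvHasKey HT x = true) ∧
    (x = u ∨ (bloques.contains x = false ∧ lx < lu))

theorem pvChild (niveau : List (Int × Int)) (HT : List (Int × List Int)) (bloques : List Int)
    (u lu : Int)
    (hpre : pvPreB u niveau HT bloques = true)
    (hu : (PySem.Dict.mk niveau).get? u = some lu)
    (x lx : Int) (vs : List Int)
    (hx : (PySem.Dict.mk niveau).get? x = some lx)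
    (hz : (lx == 0) = false)
    (hg : x = u ∨ (bloques.contains x = false ∧ lx < lu))
    (hvs : (PySem.Dict.mk HT).get? x = some vs) :
    ∀ v ∈ vs, ∃ lv, (PySem.Dict.mk niveau).get? v = some lv ∧
      ((lv == lx - 1 && !(bloques.contains v)) = true → pvQ niveau HT bloques u lu v) := by
  have hlxu : lx ≤ lu := by
    rcases hg with hg | hg
    · subst hg; rw [hu] at hx; have := Option.some.inj hx; omega
    · exact le_of_lt hg.2
  unfold pvPreB at hpre
  rw [hu] at hpre
  rw [Bool.and_eq_true] at hpre
  obtain ⟨_, hall⟩ := hpre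
  have hmem : (x, vs) ∈ HT := pvGet?_mem HT x vs hvs
  have hcl := List.all_eq_true.mp hall _ hmem
  simp only [hx, hz] at hcl
  have hgb : (x == u || (!(bloques.contains x) && decide (lx < lu))) = true := by
    rcases hg with hg | hg
    · simp [hg]
    · rw [Bool.or_eq_true]
      right
      rw [Bool.and_eq_true]
      exact ⟨by simpa using hg.1, by simp [hg.2]⟩
  rw [if_neg (by simp), if_pos hgb] at hcl
  intro v hv
  have hc := List.all_eq_true.mp hcl v hv
  cases hgv : (PySem.Dict.mk niveau).get? v with
  | none => rw [hgv] at hc; simp at hc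
  | some lv =>
    rw [hgv] at hc
    refine ⟨lv, rfl, ?_⟩
    intro hfil
    rw [Bool.and_eq_true] at hfil
    obtain ⟨heq, hnb⟩ := hfil
    have hlv : lv = lx - 1 := by simpa using heq
    have hnb' : bloques.contains v = false := by simpa using hnb
    refine ⟨lv, hgv, ?_, Or.inr ⟨hnb', by omega⟩⟩
    intro hlv0
    simp only [Bool.or_eq_true] at hc
    rcases hc with ((h | h) | h) | h
    · exact absurd heq (by simpa using h)
    · rw [hnb'] at h; exact absurd h (by simp)
    · exact absurd (by simpa using h) hlv0
    · exact h

def pvStackOK (niveau : List (Int × Int)) (HT : List (Int × List Int)) (bloques : List Int)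
    (u lu : Int) (stack : List (Nat × Int × List Int)) : Prop :=
  ∀ e ∈ stack, pvQ niveau HT bloques u lu e.2.1

theorem pvDfsB_eq_pvAny (niveau : List (Int × Int)) (HT : List (Int × List Int)) (bloques : List Int)
    (u lu : Int)
    (hpre : pvPreB u niveau HT bloques = true)
    (hu : (PySem.Dict.mk niveau).get? u = some lu) :
    ∀ (g : Nat) (stack : List (Nat × Int × List Int)),
    pvStackOK niveau HT bloques u lu stack →
    pvStackW (1 + (HT.map (fun p => p.2.length)).sum) stack < g →
    dfsB niveau HT bloques g stack = pvAny niveau HT bloques stack := by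
  intro g stack
  induction g, stack using dfsB.induct niveau HT bloques with
  | case1 => intro _ hw; omega
  | case2 g =>
    intro _ _
    simp [dfsB, pvAny]
  | case3 g x path rest ih =>
    intro hok hw
    simp only [pvStackW, pow_zero] at hw
    simp only [dfsB, pvAny, dfsA]
    rw [ih (fun e he => hok e (by simp [he])) (by omega)]
    simp
  | case4 g d x path rest hnone =>
    intro hok _
    exfalso
    obtain ⟨lx, hx, _, _⟩ := hok (d+1, x, path) (by simp)
    simp [hx] at hnone
  | case5 g d x path rest lx hsome hz =>
    intro _ _
    simp only [dfsB, pvAny, dfsA, hsome, hz]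
    simp
  | case6 g d x path rest lx hsome hz hnone =>
    intro hok _
    exfalso
    obtain ⟨lx', hx', hHTk, _⟩ := hok (d+1, x, path) (by simp)
    rw [hsome] at hx'
    injection hx' with hx'
    subst hx'
    obtain ⟨vs, hvs⟩ := pvHasKey_get? HT x (hHTk (by simpa using hz))
    simp [hvs] at hnone
  | case7 g d x path rest lx hsome hz vs hvs ih =>
    intro hok hw
    simp only [Nat.succ_eq_add_one] at hw
    obtain ⟨lx', hx', hHTk, hg⟩ := hok (d+1, x, path) (by simp)
    rw [hsome] at hx'
    injection hx' with hx'
    subst hx'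
    have hzf : (lx == 0) = false := by simpa using hz
    have hchild := pvChild niveau HT bloques u lu hpre hu x lx vs hsome hzf hg hvs
    have hokc : pvStackOK niveau HT bloques u lu
        (((vs.filter (fun v =>
            match (PySem.Dict.mk niveau).get? v with
            | some lv => lv == lx - 1 && !(bloques.contains v)
            | none => false)).map (fun v => (d, v, path ++ [x]))) ++ rest) := by
      intro e he
      rcases List.mem_append.mp he with he | he
      · obtain ⟨w, hw', rfl⟩ := List.mem_map.mp he
        obtain ⟨hwvs, hwp⟩ := List.mem_filter.mp hw'
        obtain ⟨lw, hgw, himp⟩ := hchild w hwvs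
        rw [hgw] at hwp
        exact himp hwp
      · exact hok e (by simp [he])
    have hdec : pvStackW (1 + (HT.map (fun p => p.2.length)).sum)
        (((vs.filter (fun v =>
            match (PySem.Dict.mk niveau).get? v with
            | some lv => lv == lx - 1 && !(bloques.contains v)
            | none => false)).map (fun v => (d, v, path ++ [x]))) ++ rest)
        < pvStackW (1 + (HT.map (fun p => p.2.length)).sum) ((d + 1, x, path) :: rest) := by
      rw [pvStackW_append, pvStackW_map _ d _ (fun v => rfl)]
      simp only [pvStackW]
      have hpow : 0 < (1 + (HT.map (fun p => p.2.length)).sum) ^ d := Nat.pow_pos (by omega)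
      have hlen : (vs.filter (fun v =>
          match (PySem.Dict.mk niveau).get? v with
          | some lv => lv == lx - 1 && !(bloques.contains v)
          | none => false)).length ≤ (HT.map (fun p => p.2.length)).sum :=
        le_trans (List.length_filter_le _ _) (pvLen_le_sum HT x vs hvs)
      have h1 : (vs.filter (fun v =>
          match (PySem.Dict.mk niveau).get? v with
          | some lv => lv == lx - 1 && !(bloques.contains v)
          | none => false)).length * (1 + (HT.map (fun p => p.2.length)).sum) ^ d
          ≤ (HT.map (fun p => p.2.length)).sum * (1 + (HT.map (fun p => p.2.length)).sum) ^ d :=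
        Nat.mul_le_mul_right _ hlen
      have h2 : (HT.map (fun p => p.2.length)).sum * (1 + (HT.map (fun p => p.2.length)).sum) ^ d
          < (1 + (HT.map (fun p => p.2.length)).sum) ^ (d + 1) := by
        rw [pow_succ]; nlinarith [hpow]
      omega
    simp only [dfsB, hsome]
    rw [if_neg hz]
    split
    · rename_i hnone
      rw [hvs] at hnone
      simp at hnone
    · rename_i vs' hvs'
      rw [hvs] at hvs'
      injection hvs' with hvv
      subst hvv
      rw [ih hokc (by omega)]
      rw [pvAny_append, pvAny_children niveau HT bloques d lx x path vs
            (fun v hv => by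
              obtain ⟨lw, hgw, _⟩ := hchild v hv
              exact List.any_eq_true.mpr ⟨(v, lw), pvGet?_mem niveau v lw hgw, by simp⟩)]
      simp only [pvAny, dfsA, hsome, hvs]
      rw [if_neg hz]

-- ===== VERDICT (by name: the statement is the Claim_ definition above) =====
theorem dfs_augmentant_spec : Claim_equal_dfs_augmentant := by
  intro u niveau HT chemin chemins N bloques _ hPre
  unfold Pre_dfs_augmentant at hPre
  cases hgu : (PySem.Dict.mk niveau).get? u with
  | none => unfold pvPreB at hPre; rw [hgu] at hPre; simp at hPre
  | some lu =>
    have htop : (lu == 0 || pvHasKey HT u) = true := by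
      unfold pvPreB at hPre; rw [hgu] at hPre
      rw [Bool.and_eq_true] at hPre; exact hPre.1
    unfold Spec_dfs_augmentant dfs_augmentant dfs_augmentant_alt
    rw [pvDfsB_eq_pvAny niveau HT bloques u lu hPre hgu _ _
          (by
            intro e he; simp at he; subst he
            refine ⟨lu, hgu, ?_, Or.inl rfl⟩
            intro hl0
            rw [Bool.or_eq_true] at htop
            rcases htop with h | h
            · exact absurd (by simpa using h) hl0
            · exact h)
          (by simp only [pvStackW]; omega)]
    simp [pvAny]
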